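-- pv_equiv track=rewrite | github.com/JangYuBBin/PROGRAMMERS | LV3/최고의 집합.py | solution
-- ===== SOURCE A (Python) =====
-- def solution(n, s):
--     answer = []
--
--     while n != 0:
--         q, r = divmod(s, n)
--         if q == 0:
--             return [-1]
--
--         answer.append(q)
--
--         s -= q
--
--         n -= 1
--
--     answer.sort(reverse = False)
--
--     return answer
-- ===== SOURCE B (Python) =====
-- def solution(n, s):
--     # Optimal split of s into n positive parts: make the parts as equal as possible.
--     if s < n:
--         return [-1]
--     q, r = divmod(s, n)
--     return [q] * (n - r) + [q + 1] * r
-- ===== Notes on version B (the rewrite author's own statement) =====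
-- stated objective: faster
-- what changed: Replaces A's n-step divmod loop followed by a sort with the closed form q = s // n, r = s % n giving (n - r) copies of q and r copies of q + 1 ([-1] when s < n); Pre_ restricts to the problem's natural domain n >= 1, s >= 0 - outside it A diverges for most n < 0, returns [] for n = 0 even when s > 0, and for s < 0 returns lists of negative 'parts' indistinguishable from the [-1] failure sentinel, while B divides by zero at n = 0 and reports [-1] for s < 0.
-- outside the precondition, e.g. on solution(0, 5): A returns [], B raises ZeroDivisionError; on solution(3, -3): A returns [-1, -1, -1], B returns [-1]
import Mathlib
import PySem

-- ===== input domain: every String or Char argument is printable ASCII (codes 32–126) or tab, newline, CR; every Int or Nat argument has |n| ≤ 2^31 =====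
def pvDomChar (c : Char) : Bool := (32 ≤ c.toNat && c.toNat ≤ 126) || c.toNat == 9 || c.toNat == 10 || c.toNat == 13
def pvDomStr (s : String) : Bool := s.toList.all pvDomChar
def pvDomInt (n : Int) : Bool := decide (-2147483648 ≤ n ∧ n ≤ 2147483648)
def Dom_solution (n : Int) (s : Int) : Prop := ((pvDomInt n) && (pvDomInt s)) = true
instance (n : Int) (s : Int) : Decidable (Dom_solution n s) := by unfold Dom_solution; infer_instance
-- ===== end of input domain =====

-- B replaces A's divmod loop + sort with the closed form (n-r) copies of s//n then r copies of s//n+1, on the problem's natural domain n >= 1, s >= 0 (measured faster in a timing run).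


-- ===== PORT A =====
-- A's 'while n != 0' loop; fuel = n.toNat bounds the iterations (for n ≥ 1, i.e. inside
-- Pre_solution, the fuel is exactly enough and never runs out; for n < 0 Python's loop diverges).
def solutionGo (fuel : Nat) (n s : Int) (answer : List Int) : List Int :=
  if n = 0 then PySem.List.sorted answer (fun x => x) false   -- answer.sort(reverse=False)
  else
    match fuel with
    | 0 => []
    | fuel' + 1 =>
      let q := PySem.Int.floordiv s n        -- q, r = divmod(s, n)  (r unused by A)
      if q = 0 then [-1]
      else solutionGo fuel' (n - 1) (s - q) (answer ++ [q])

def solution (n : Int) (s : Int) : List Int := solutionGo n.toNat n s []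

-- ===== PORT B =====
def solution_alt (n : Int) (s : Int) : List Int :=
  if s < n then [-1]
  else
    let q := PySem.Int.floordiv s n
    let r := PySem.Int.mod s n
    List.replicate (n - r).toNat q ++ List.replicate r.toNat (q + 1)

-- ===== PRECONDITION & SPEC =====
-- Pre_ restricts to the problem's natural domain (split s ≥ 0 into n ≥ 1 positive parts):
-- outside it, for n < 0 A's 'while n != 0' loop diverges on most inputs, for n = 0 A returns []
-- even when s > 0, and for s < 0 A returns lists of negative 'parts' indistinguishable from the
-- [-1] failure sentinel, while B (which divides by n) raises at n = 0 and reports [-1] for s < 0.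
def Pre_solution (n : Int) (s : Int) : Prop := 1 ≤ n ∧ 0 ≤ s
instance (n : Int) (s : Int) : Decidable (Pre_solution n s) := by unfold Pre_solution; infer_instance
def pvWitness_solution : Int × Int := (3, 7)

def Spec_solution (n : Int) (s : Int) (out : List Int) : Prop := out = solution_alt n s
instance (n : Int) (s : Int) (out : List Int) : Decidable (Spec_solution n s out) := by unfold Spec_solution; infer_instance

-- ===== CLAIM (what is proved, stated in full; the proofs are below) =====
def Claim_equal_solution : Prop := ∀ (n : Int) (s : Int), Dom_solution n s → Pre_solution n s → Spec_solution n s (solution n s)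

-- ===== LEMMAS AND PROOFS =====

-- Loop characterisation: with base = s//n, r = s%n and enough fuel, A's loop returns [-1]
-- exactly when some quotient hits 0 (base = 0, or base = -1 with r > 0), and otherwise the
-- sorted answer is answer ++ (n-r) copies of base ++ r copies of base+1.
theorem solutionGo_spec : ∀ (fuel : Nat) (n s : Int) (answer : List Int), 1 ≤ n → n.toNat ≤ fuel →
    solutionGo fuel n s answer =
      if PySem.Int.floordiv s n = 0 ∨ (PySem.Int.floordiv s n = -1 ∧ 0 < PySem.Int.mod s n)
      then [-1]
      else PySem.List.sorted
        (answer ++ List.replicate (n - PySem.Int.mod s n).toNat (PySem.Int.floordiv s n)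
                ++ List.replicate (PySem.Int.mod s n).toNat (PySem.Int.floordiv s n + 1))
        (fun x => x) false := by
  intro fuel
  induction fuel with
  | zero => intro n s answer hn hf; omega
  | succ fuel ih =>
    intro n s answer hn hf
    have hn0 : n ≠ 0 := by omega
    have hpos : (0:Int) < n := by omega
    have hmodnn := PySem.Int.mod_nonneg s hpos
    have hmodlt := PySem.Int.mod_lt s hpos
    have hdm := PySem.Int.floordiv_mul_add_mod s n
    rw [solutionGo.eq_def]
    simp only [hn0, if_false]
    generalize hq : PySem.Int.floordiv s n = q at *
    generalize hr : PySem.Int.mod s n = r at *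
    by_cases hq0 : q = 0
    · simp [hq0]
    · simp only [hq0, if_false]
      by_cases hnn : n = 1
      · -- last iteration: n - 1 = 0, loop ends and sorts
        subst hnn
        have hr0 : r = 0 := by omega
        rw [mul_one] at hdm
        have hq1 : q = s := by omega
        rw [solutionGo.eq_def]
        simp [hr0, hq1]
      · -- n ≥ 2: one more iteration, quotient/remainder of the smaller instance
        have hn2 : (2:Int) ≤ n := by omega
        have hpos' : (0:Int) < n - 1 := by omega
        by_cases hrtop : r = n - 1
        · -- remainder saturates: quotient flips to q+1, remainder 0
          have hq' : PySem.Int.floordiv (s - q) (n - 1) = q + 1 := by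
            rw [PySem.Int.floordiv_eq_iff_of_pos hpos']; constructor <;> nlinarith
          have hr' : PySem.Int.mod (s - q) (n - 1) = 0 := by
            have h2 := PySem.Int.floordiv_mul_add_mod (s - q) (n - 1)
            rw [hq'] at h2; nlinarith
          rw [ih (n - 1) (s - q) (answer ++ [q]) (by omega) (by omega), hq', hr']
          by_cases hcond : q = -1 ∧ 0 < r
          · have hcl : q + 1 = 0 ∨ (q + 1 = -1 ∧ (0:Int) < 0) := Or.inl (by omega)
            rw [if_pos hcl, if_pos (Or.inr hcond)]
          · have hcl : ¬ (q + 1 = 0 ∨ (q + 1 = -1 ∧ (0:Int) < 0)) := by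
              rintro (h | ⟨h, h0⟩)
              · exact hcond ⟨by omega, by omega⟩
              · omega
            have hcl2 : ¬ (False ∨ (q = -1 ∧ 0 < r)) := by
              rintro (h | h); · exact h
              exact hcond h
            rw [if_neg hcl, if_neg hcl2]
            have h1 : (n - r).toNat = 1 := by omega
            have h3 : r.toNat = n.toNat - 1 := by omega
            simp [h1, h3, List.replicate_succ]
        · -- remainder r < n - 1 carries over: quotient stays q
          have hrlt : r < n - 1 := by omega
          have hq' : PySem.Int.floordiv (s - q) (n - 1) = q := by
            rw [PySem.Int.floordiv_eq_iff_of_pos hpos']; constructor <;> nlinarith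
          have hr' : PySem.Int.mod (s - q) (n - 1) = r := by
            have h2 := PySem.Int.floordiv_mul_add_mod (s - q) (n - 1)
            rw [hq'] at h2; nlinarith
          rw [ih (n - 1) (s - q) (answer ++ [q]) (by omega) (by omega), hq', hr']
          by_cases hcond : q = -1 ∧ 0 < r
          · rw [if_pos (Or.inr hcond), if_pos (Or.inr hcond)]
          · have hcl : ¬ (False ∨ (q = -1 ∧ 0 < r)) := by
              rintro (h | h); · exact h
              exact hcond h
            have hcl2 : ¬ (q = 0 ∨ (q = -1 ∧ 0 < r)) := by
              rintro (h | h); · exact hq0 h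
              exact hcond h
            rw [if_neg hcl2, if_neg hcl]
            have h1 : (n - r).toNat = (n - 1 - r).toNat + 1 := by omega
            simp [h1, List.replicate_succ]

-- The closed-form part list is already nondecreasing, so Python's sort leaves it unchanged.
theorem sorted_parts (a b : Nat) (x : Int) :
    PySem.List.sorted (List.replicate a x ++ List.replicate b (x + 1)) (fun y => y) false
      = List.replicate a x ++ List.replicate b (x + 1) := by
  apply PySem.List.sorted_eq_self_of_pairwise
  rw [List.pairwise_append]
  refine ⟨?_, ?_, ?_⟩
  · exact List.pairwise_replicate.mpr (Or.inr le_rfl)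
  · exact List.pairwise_replicate.mpr (Or.inr le_rfl)
  · intro u hu v hv
    rw [List.eq_of_mem_replicate hu, List.eq_of_mem_replicate hv]; omega

-- ===== VERDICT (by name: the statement is the Claim_ definition above) =====
theorem solution_spec : Claim_equal_solution := by
  intro n s _ hpre
  obtain ⟨hn1, hs0⟩ := hpre
  unfold Spec_solution solution solution_alt
  have hpos : (0:Int) < n := by omega
  have hmodnn := PySem.Int.mod_nonneg s hpos
  have hmodlt := PySem.Int.mod_lt s hpos
  have hdm := PySem.Int.floordiv_mul_add_mod s n
  rw [solutionGo_spec n.toNat n s [] hn1 le_rfl]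
  by_cases hlt : s < n
  · -- 0 ≤ s < n forces quotient 0: both sides are [-1]
    have hq0 : PySem.Int.floordiv s n = 0 := by nlinarith
    rw [if_pos (Or.inl hq0), if_pos hlt]
  · -- s ≥ n forces quotient ≥ 1: both sides are the closed-form list
    have hq1 : 1 ≤ PySem.Int.floordiv s n := by nlinarith
    have hcl : ¬ (PySem.Int.floordiv s n = 0 ∨
        (PySem.Int.floordiv s n = -1 ∧ 0 < PySem.Int.mod s n)) := by
      rintro (h | ⟨h, _⟩) <;> omega
    rw [if_neg hcl, if_neg hlt]
    simpa using sorted_parts _ _ _
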